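-- pv_equiv track=rewrite | github.com/wherby/code | contest/older/c261/q2/t2.py | missingRolls
-- ===== SOURCE A (Python) =====
-- def missingRolls(rolls, mean, n):
--     """
--     :type rolls: List[int]
--     :type mean: int
--     :type n: int
--     :rtype: List[int]
--     """
--     m = len(rolls)
--     sm = mean *(m+n) - sum(rolls)
--     if sm >n*6 or sm <n:
--         return []
--     res =[1] * n
--     sm = sm -n
--     for i in range(n):
--         if sm ==0:
--             continue
--         if sm >=5:
--             res[i] =6
--             sm -=5
--         else:
--             res[i] = sm +1
--             sm =0
--     return res
-- ===== SOURCE B (Python) =====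
-- def missingRolls(rolls, mean, n):
--     sm = mean * (len(rolls) + n) - sum(rolls)
--     if sm > n * 6 or sm < n:
--         return []
--     q, r = divmod(sm - n, 5)
--     extra = [r + 1] if r else []
--     return [6] * q + extra + [1] * (n - q - len(extra))
-- ===== Notes on version B (the rewrite author's own statement) =====
-- stated objective: simpler
-- what changed: Replaces A's per-position greedy loop over a mutable [1]*n array with a closed-form divmod(sm-n, 5) and direct construction by list concatenation (q sixes, an optional remainder element, then ones).
import Mathlib
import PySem

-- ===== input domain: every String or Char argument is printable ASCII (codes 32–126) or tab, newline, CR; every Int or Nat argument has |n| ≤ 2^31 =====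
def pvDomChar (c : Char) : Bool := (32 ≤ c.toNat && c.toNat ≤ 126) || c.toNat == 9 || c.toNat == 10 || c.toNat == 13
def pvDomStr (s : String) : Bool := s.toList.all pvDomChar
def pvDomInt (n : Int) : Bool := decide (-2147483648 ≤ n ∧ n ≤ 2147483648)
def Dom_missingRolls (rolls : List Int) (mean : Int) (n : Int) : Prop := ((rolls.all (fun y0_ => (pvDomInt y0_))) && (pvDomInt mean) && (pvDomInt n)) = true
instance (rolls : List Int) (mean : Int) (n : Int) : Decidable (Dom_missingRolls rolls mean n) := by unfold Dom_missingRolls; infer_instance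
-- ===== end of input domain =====

-- B replaces A's greedy per-position loop by a closed-form divmod and direct list construction (objective: simpler).

-- ===== PORT A =====
-- loop body of A's 'for i in range(n)' (state: (res, sm))
def pvStepA (p : List Int × Int) (i : Int) : List Int × Int :=
  if p.2 = 0 then p
  else if p.2 ≥ 5 then (PySem.List.pySetD p.1 i 6, p.2 - 5)
  else (PySem.List.pySetD p.1 i (p.2 + 1), 0)

def missingRolls (rolls : List Int) (mean : Int) (n : Int) : List Int :=
  let m : Int := rolls.length
  let sm := mean * (m + n) - rolls.sum
  if sm > n * 6 ∨ sm < n then []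
  else
    let res := List.replicate n.toNat (1 : Int)  -- [1] * n (empty for n ≤ 0, as in Python)
    let sm2 := sm - n
    ((PySem.List.pyRange 0 n 1).foldl pvStepA (res, sm2)).1

-- ===== PORT B =====
def missingRolls_alt (rolls : List Int) (mean : Int) (n : Int) : List Int :=
  let sm := mean * ((rolls.length : Int) + n) - rolls.sum
  if sm > n * 6 ∨ sm < n then []
  else
    let q := PySem.Int.floordiv (sm - n) 5
    let r := PySem.Int.mod (sm - n) 5
    let extra : List Int := if r ≠ 0 then [r + 1] else []
    List.replicate q.toNat 6 ++ extra ++ List.replicate (n - q - extra.length).toNat 1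

-- ===== PRECONDITION & SPEC =====
def Spec_missingRolls (rolls : List Int) (mean : Int) (n : Int) (out : List Int) : Prop := out = missingRolls_alt rolls mean n
instance (rolls : List Int) (mean : Int) (n : Int) (out : List Int) : Decidable (Spec_missingRolls rolls mean n out) := by unfold Spec_missingRolls; infer_instance

-- ===== CLAIM (what is proved, stated in full; the proofs are below) =====
def Claim_equal_missingRolls : Prop := ∀ (rolls : List Int) (mean : Int) (n : Int), Dom_missingRolls rolls mean n → Spec_missingRolls rolls mean n (missingRolls rolls mean n)

-- ===== LEMMAS AND PROOFS =====

-- what A's loop writes over a suffix of k ones, as a structural recursion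
def pvOut : Nat → Int → List Int
  | 0, _ => []
  | k + 1, sm =>
    if sm = 0 then 1 :: pvOut k sm
    else if sm ≥ 5 then 6 :: pvOut k (sm - 5)
    else (sm + 1) :: pvOut k 0

lemma pvLoop_eq_out (k : Nat) : ∀ (pre : List Int) (sm : Int),
    ((PySem.List.pyRange (pre.length : Int) ((pre.length : Int) + k) 1).foldl pvStepA
      (pre ++ List.replicate k 1, sm)).1 = pre ++ pvOut k sm := by
  induction k with
  | zero =>
    intro pre sm
    simp [PySem.List.pyRange_one_eq_nil, pvOut]
  | succ k ih =>
    intro pre sm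
    rw [PySem.List.pyRange_one_cons (by omega)]
    by_cases h0 : sm = 0
    · subst h0
      have := ih (pre ++ [1]) 0
      simp only [List.length_append, List.length_singleton, Nat.cast_add, Nat.cast_one] at this
      rw [show ((pre.length : Int) + 1 + (k : Int)) = (pre.length : Int) + ((k : Nat) + 1 : Nat) by push_cast; ring] at this
      rw [show (pre ++ [1]) ++ List.replicate k (1:Int) = pre ++ List.replicate (k+1) 1 by
        simp [List.replicate_succ, List.append_assoc]] at this
      simp only [List.foldl_cons, pvStepA, reduceIte]
      rw [this]
      simp [pvOut, List.append_assoc]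
    · by_cases h5 : sm ≥ 5
      · have := ih (pre ++ [6]) (sm - 5)
        simp only [List.length_append, List.length_singleton, Nat.cast_add, Nat.cast_one] at this
        simp only [List.foldl_cons, pvStepA, if_neg h0, if_pos h5]
        rw [PySem.List.pySetD_natCast]
        rw [show (pre ++ List.replicate (k+1) (1:Int)).set pre.length 6 = (pre ++ [6]) ++ List.replicate k 1 by
          simp [List.replicate_succ, List.set_append_right, List.append_assoc]]
        rw [show ((pre.length : Int) + 1 + (k : Int)) = (pre.length : Int) + ((k : Nat) + 1 : Nat) by push_cast; ring] at this
        rw [this]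
        simp [pvOut, h0, h5, List.append_assoc]
      · have := ih (pre ++ [sm + 1]) 0
        simp only [List.length_append, List.length_singleton, Nat.cast_add, Nat.cast_one] at this
        simp only [List.foldl_cons, pvStepA, if_neg h0, if_neg h5]
        rw [PySem.List.pySetD_natCast]
        rw [show (pre ++ List.replicate (k+1) (1:Int)).set pre.length (sm + 1) = (pre ++ [sm + 1]) ++ List.replicate k 1 by
          simp [List.replicate_succ, List.set_append_right, List.append_assoc]]
        rw [show ((pre.length : Int) + 1 + (k : Int)) = (pre.length : Int) + ((k : Nat) + 1 : Nat) by push_cast; ring] at this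
        rw [this]
        simp [pvOut, h0, h5, List.append_assoc]

lemma pvOut_closed (k : Nat) : ∀ (s : Nat), s ≤ 5 * k →
    pvOut k (s : Int) = List.replicate (s / 5) 6 ++
      (if (s % 5 : Nat) ≠ 0 then [((s % 5 : Nat) : Int) + 1] else []) ++
      List.replicate (k - s / 5 - (if (s % 5 : Nat) = 0 then 0 else 1)) 1 := by
  induction k with
  | zero =>
    intro s hs
    interval_cases s
    simp [pvOut]
  | succ k ih =>
    intro s hs
    by_cases h0 : s = 0
    · subst h0
      have hz := ih 0 (by omega)
      simp only [Nat.cast_zero] at hz ⊢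
      simp only [pvOut, reduceIte]
      rw [hz]
      simp [List.replicate_succ]
    · have h1 : ¬ ((s : Int) = 0) := by exact_mod_cast h0
      by_cases h5 : 5 ≤ s
      · have h5' : ((s : Int)) ≥ 5 := by exact_mod_cast h5
        simp only [pvOut, if_neg h1, if_pos h5']
        have hcast : (s : Int) - 5 = ((s - 5 : Nat) : Int) := by omega
        rw [hcast, ih (s - 5) (by omega)]
        have hdiv : s / 5 = (s - 5) / 5 + 1 := by omega
        have hmod : s % 5 = (s - 5) % 5 := by omega
        rw [hmod, hdiv]
        simp only [List.replicate_succ]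
        have hlen : k + 1 - ((s - 5) / 5 + 1) - (if (s - 5) % 5 = 0 then 0 else 1)
            = k - (s - 5) / 5 - (if (s - 5) % 5 = 0 then 0 else 1) := by omega
        rw [hlen]
        simp [List.append_assoc]
      · have h2 : ¬ ((s : Int) ≥ 5) := by omega
        simp only [pvOut, if_neg h1, if_neg h2]
        have hz := ih 0 (by omega)
        simp only [Nat.cast_zero] at hz
        rw [hz]
        have hdiv : s / 5 = 0 := by omega
        have hmod : s % 5 = s := by omega
        rw [hdiv, hmod]
        simp [h0]

-- ===== VERDICT (by name: the statement is the Claim_ definition above) =====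
theorem missingRolls_spec : Claim_equal_missingRolls := by
  intro rolls mean n _
  unfold Spec_missingRolls missingRolls missingRolls_alt
  by_cases hc : mean * ((rolls.length : Int) + n) - rolls.sum > n * 6 ∨
      mean * ((rolls.length : Int) + n) - rolls.sum < n
  · rw [if_pos hc, if_pos hc]
  · rw [if_neg hc, if_neg hc]
    generalize hsm : mean * ((rolls.length : Int) + n) - rolls.sum = sm at hc
    rw [not_or, not_lt, not_lt] at hc
    obtain ⟨h6, hn⟩ := hc
    have hn0 : 0 ≤ n := by omega
    have hd0 : 0 ≤ sm - n := by omega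
    set k : Nat := n.toNat with hk
    have hkn : (k : Int) = n := Int.toNat_of_nonneg hn0
    set s : Nat := (sm - n).toNat with hsN
    have hsi : ((s : Nat) : Int) = sm - n := Int.toNat_of_nonneg hd0
    have hsk : s ≤ 5 * k := by omega
    have hloop := pvLoop_eq_out k ([] : List Int) (sm - n)
    simp only [List.length_nil, Nat.cast_zero, List.nil_append, zero_add] at hloop
    rw [hkn] at hloop
    rw [hloop, ← hsi, pvOut_closed k s hsk]
    have hq : PySem.Int.floordiv ((s : Nat) : Int) 5 = ((s / 5 : Nat) : Int) := by
      exact_mod_cast PySem.Int.floordiv_natCast s 5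
    have hr : PySem.Int.mod ((s : Nat) : Int) 5 = ((s % 5 : Nat) : Int) := by
      exact_mod_cast PySem.Int.mod_natCast s 5
    rw [hq, hr]
    by_cases hm : s % 5 = 0
    · have hm' : ((s % 5 : Nat) : Int) = 0 := by exact_mod_cast hm
      simp only [hm, ne_eq, not_true_eq_false, if_false, reduceIte, Nat.cast_zero,
        Int.toNat_natCast, List.length_nil, List.append_nil]
      have ht : (n - ((s / 5 : Nat) : Int) - 0).toNat = k - s / 5 := by omega
      rw [ht, Nat.sub_zero]
    · have hm' : ¬ (((s % 5 : Nat) : Int) = 0) := by exact_mod_cast hm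
      simp only [hm, hm', ne_eq, not_false_eq_true, if_true, reduceIte,
        Int.toNat_natCast, List.length_singleton]
      have ht : (n - ((s / 5 : Nat) : Int) - ((1 : Nat) : Int)).toNat = k - s / 5 - 1 := by omega
      rw [ht]
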